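-- pv_equiv track=rewrite | github.com/philippeAlexandre/MTG_Generator | generator/render.py | _order_colors_cycle
-- ===== SOURCE A (Python) =====
-- def _order_colors_cycle(symbols: str) -> str:
--     """
--     Order MTG colors by minimizing the arc distance on the WUBRG cycle.
--     Example: 'UG' → 'GU'
--             'RWU' → 'URW'
--             'BG' → 'GB'
--     """
--
--     cycle = ["W", "U", "B", "R", "G"]
--     idx = {c: i for i, c in enumerate(cycle)}
--
--     colors = set(symbols)
--
--     best = None
--
--     for start in colors:
--         start_i = idx[start]
--         ordered = [start]
--
--         # Walk clockwise until all colors are collected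
--         i = (start_i + 1) % 5
--         while len(ordered) < len(colors):
--             c = cycle[i]
--             if c in colors and c not in ordered:
--                 ordered.append(c)
--             i = (i + 1) % 5
--
--         # Evaluate arc length
--         arc_length = (idx[ordered[-1]] - idx[start]) % 5
--
--         candidate = ("".join(ordered), arc_length)
--
--         if best is None or candidate[1] < best[1] or (
--             candidate[1] == best[1] and candidate[0] < best[0]
--         ):
--             best = candidate
--
--     return best[0]
-- ===== SOURCE B (Python) =====
-- def _order_colors_cycle(symbols: str) -> str:
--     cycle = "WUBRG"
--     idx = {c: i for i, c in enumerate(cycle)}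
--
--     # strictly increasing cycle indices of the distinct colors present
--     present = sorted(idx[c] for c in set(symbols))
--     n = len(present)
--
--     # cyclic gap after each present index; the minimal arc is 5 - (largest gap)
--     gaps = [(present[(k + 1) % n] - present[k]) % 5 for k in range(n)]
--     m = max(gaps)
--
--     best = None
--     for k in range(n):
--         if gaps[k] == m:
--             j = (k + 1) % n
--             rotation = present[j:] + present[:j]
--             s = "".join(cycle[i] for i in rotation)
--             if best is None or s < best:
--                 best = s
--     return best
-- ===== Notes on version B (the rewrite author's own statement) =====
-- stated objective: simpler
-- what changed: Instead of trying every present color as a start and walking the cycle for each (rebuilding the ordering and comparing (arc, string) candidates), B sorts the present cycle indices once, computes the cyclic gaps, and reads the answers off the maximal gaps: each maximal gap's successor starts a minimal-arc rotation, and the lexicographically smallest rotation string is returned.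
import Mathlib
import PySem

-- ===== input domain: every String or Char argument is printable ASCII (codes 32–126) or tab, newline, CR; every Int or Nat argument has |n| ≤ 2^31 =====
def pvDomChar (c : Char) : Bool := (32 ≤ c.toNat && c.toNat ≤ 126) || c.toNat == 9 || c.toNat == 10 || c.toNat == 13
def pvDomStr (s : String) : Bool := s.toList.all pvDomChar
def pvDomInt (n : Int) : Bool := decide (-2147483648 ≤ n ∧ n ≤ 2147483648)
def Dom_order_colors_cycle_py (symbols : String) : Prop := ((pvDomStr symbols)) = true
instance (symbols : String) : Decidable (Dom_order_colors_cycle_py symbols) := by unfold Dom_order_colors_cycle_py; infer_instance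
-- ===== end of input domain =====

-- B replaces A's try-every-start walk-and-compare loop by one pass over the sorted
-- cyclic gaps between the present colors (objective: simpler).
-- Strings are handled on the List Char side (PySem convention); lexicographic `<`
-- on List Char is exactly Python's `<` on these strings; join to String at the end.

-- ===== PORT A =====
-- cycle = ["W", "U", "B", "R", "G"]
def pvCycle : List Char := ['W', 'U', 'B', 'R', 'G']

-- idx = {c: i for i, c in enumerate(cycle)}
def pvIdx : PySem.Dict Char Int :=
  (PySem.List.enumerate pvCycle).foldl (fun d p => d.insert p.2 p.1) PySem.Dict.empty

-- the 'while len(ordered) < len(colors)' walk; Python has no fuel: inside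
-- Pre_ the loop performs at most 4 iterations (i visits every cycle position
-- within 4 steps), so fuel 8 is never exhausted there (exact on Pre_).
def pvWalkA (colors : List Char) : List Char → Int → Nat → List Char
  | ordered, _, 0 => ordered
  | ordered, i, fuel + 1 =>
    if ordered.length < colors.length then
      let c := (PySem.List.pyGet? pvCycle i).getD ' '   -- cycle[i]; i ∈ [0,5) always
      let ordered' := if colors.contains c && !ordered.contains c then ordered ++ [c] else ordered
      pvWalkA colors ordered' (PySem.Int.mod (i + 1) 5) fuel
    else ordered

-- one candidate = ("".join(ordered), arc_length) for a given start
def pvCandA (colors : List Char) (start : Char) : List Char × Int :=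
  let start_i := pvIdx.getD start 0                      -- idx[start]; present inside Pre_
  let ordered := pvWalkA colors [start] (PySem.Int.mod (start_i + 1) 5) 8
  let arc := PySem.Int.mod
      (pvIdx.getD ((PySem.List.pyGet? ordered (-1)).getD ' ') 0 - pvIdx.getD start 0) 5
  (ordered, arc)

-- the 'for start in colors' loop maintaining best
def pvBestA (colors : List Char) : Option (List Char × Int) :=
  colors.foldl (fun best start =>
    let candidate := pvCandA colors start
    match best with
    | none => some candidate
    | some b =>
      if candidate.2 < b.2 || (candidate.2 == b.2 && decide (candidate.1 < b.1)) then
        some candidate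
      else some b) none

def pvAfrom (colors : List Char) : List Char :=
  match pvBestA colors with
  | some b => b.1
  | none => []                                           -- Python: best[0] on None → TypeError; outside Pre_

def order_colors_cycle_py (symbols : String) : String :=
  String.ofList (pvAfrom (PySem.Set.ofList symbols.toList))   -- colors = set(symbols)

-- ===== PORT B =====
def pvCycleB : List Char := ['W', 'U', 'B', 'R', 'G']    -- cycle = "WUBRG"

def pvIdxB : PySem.Dict Char Int :=
  (PySem.List.enumerate pvCycleB).foldl (fun d p => d.insert p.2 p.1) PySem.Dict.empty

def pvBfrom (l : List Char) : List Char :=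
  -- present = sorted(idx[c] for c in set(symbols))
  let present := PySem.List.sorted (l.map (fun c => pvIdxB.getD c 0)) (fun x => x) false
  let n := present.length
  -- gaps = [(present[(k+1)%n] - present[k]) % 5 for k in range(n)]
  let gaps := (PySem.List.pyRange 0 (n : Int) 1).map (fun k =>
    PySem.Int.mod
      ((PySem.List.pyGet? present (PySem.Int.mod (k + 1) (n : Int))).getD 0
        - (PySem.List.pyGet? present k).getD 0) 5)
  match PySem.List.max? gaps (fun x => x) with
  | none => []                                           -- Python: max([]) → ValueError; outside Pre_
  | some m =>
    let best := (PySem.List.pyRange 0 (n : Int) 1).foldl (fun best k =>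
      if (PySem.List.pyGet? gaps k).getD 0 == m then
        let j := PySem.Int.mod (k + 1) (n : Int)
        let rotation := PySem.List.slice present (some j) none
                          ++ PySem.List.slice present none (some j)
        let s := rotation.map (fun i => (PySem.List.pyGet? pvCycleB i).getD ' ')
        match best with
        | none => some s
        | some b => if decide (s < b) then some s else some b
      else best) (none : Option (List Char))
    best.getD []

def order_colors_cycle_py_alt (symbols : String) : String :=
  String.ofList (pvBfrom (PySem.Set.ofList symbols.toList))

-- ===== PRECONDITION & SPEC =====
-- Pre_ excludes exactly the inputs on which A raises or diverges: the empty string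
-- (best stays None, so best[0] raises TypeError) and strings containing a character
-- outside WUBRG (idx[start] raises KeyError, or the while loop never terminates).
def Pre_order_colors_cycle_py (symbols : String) : Prop :=
  symbols.toList ≠ [] ∧ symbols.toList.all (fun c => pvCycle.contains c) = true

instance (symbols : String) : Decidable (Pre_order_colors_cycle_py symbols) := by
  unfold Pre_order_colors_cycle_py; infer_instance

def pvWitness_order_colors_cycle_py : String := "RWU"

def Spec_order_colors_cycle_py (symbols : String) (out : String) : Prop := out = order_colors_cycle_py_alt symbols
instance (symbols : String) (out : String) : Decidable (Spec_order_colors_cycle_py symbols out) := by unfold Spec_order_colors_cycle_py; infer_instance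

-- ===== CLAIM (what is proved, stated in full; the proofs are below) =====
def Claim_equal_order_colors_cycle_py : Prop := ∀ (symbols : String), Dom_order_colors_cycle_py symbols → Pre_order_colors_cycle_py symbols → Spec_order_colors_cycle_py symbols (order_colors_cycle_py symbols)

-- ===== LEMMAS AND PROOFS =====

-- all tuples over the 5 cycle colors, of length exactly n / of length 1..5
def pvExact : Nat → List (List Char)
  | 0 => [[]]
  | n + 1 => (pvExact n).flatMap (fun t => pvCycle.map (fun c => c :: t))

def pvAll : List (List Char) :=
  pvExact 1 ++ pvExact 2 ++ pvExact 3 ++ pvExact 4 ++ pvExact 5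

set_option maxRecDepth 100000 in
theorem pv_key_bool : (pvAll.all fun l => !l.Nodup || (pvAfrom l == pvBfrom l)) = true := by
  decide

theorem pv_key : ∀ l ∈ pvAll, l.Nodup → pvAfrom l = pvBfrom l := by
  intro l hl hnd
  simpa [hnd] using List.all_eq_true.mp pv_key_bool l hl

theorem mem_pvExact (l : List Char) (hsub : ∀ c ∈ l, c ∈ pvCycle) :
    l ∈ pvExact l.length := by
  induction l with
  | nil => simp [pvExact]
  | cons c t ih =>
    simp only [List.length_cons, pvExact, List.mem_flatMap, List.mem_map]
    exact ⟨t, ih (fun x hx => hsub x (List.mem_cons_of_mem _ hx)),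
      c, hsub c List.mem_cons_self, rfl⟩

theorem mem_pvAll_of (l : List Char) (hne : l ≠ []) (hnd : l.Nodup)
    (hsub : ∀ c ∈ l, c ∈ pvCycle) : l ∈ pvAll := by
  have hlen : l.length ≤ 5 := by
    have h1 : l.toFinset.card = l.length := List.toFinset_card_of_nodup hnd
    have h2 : l.toFinset ⊆ pvCycle.toFinset := by
      intro a ha
      exact List.mem_toFinset.mpr (hsub a (List.mem_toFinset.mp ha))
    have := Finset.card_le_card h2
    simp only [h1] at this
    simpa [pvCycle] using this
  have hpos : 0 < l.length := List.length_pos_of_ne_nil hne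
  have hmem := mem_pvExact l hsub
  have : l.length = 1 ∨ l.length = 2 ∨ l.length = 3 ∨ l.length = 4 ∨ l.length = 5 := by omega
  unfold pvAll
  rcases this with h | h | h | h | h <;> rw [h] at hmem <;> simp [hmem]

-- ===== VERDICT (by name: the statement is the Claim_ definition above) =====
theorem order_colors_cycle_py_spec : Claim_equal_order_colors_cycle_py := by
  intro symbols _ hpre
  unfold Spec_order_colors_cycle_py order_colors_cycle_py order_colors_cycle_py_alt
  congr 1
  apply pv_key
  · apply mem_pvAll_of
    · obtain ⟨hne, _⟩ := hpre
      intro h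
      rcases List.exists_mem_of_ne_nil _ hne with ⟨x, hx⟩
      have : x ∈ PySem.Set.ofList symbols.toList := (PySem.Set.mem_ofList _ _).mpr hx
      simp [h] at this
    · exact PySem.Set.nodup_ofList _
    · intro c hc
      simpa using List.all_eq_true.mp hpre.2 c ((PySem.Set.mem_ofList _ _).mp hc)
  · exact PySem.Set.nodup_ofList _
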